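-- pv_equiv track=rewrite | github.com/johnsamuelwrites/mlscores | mlscores/scores.py | get_missing_translations_for_all_languages
-- ===== SOURCE A (Python) =====
-- def get_missing_translations_for_all_languages(properties):
--     """
--     Find properties that do not have translations in all languages.
--
--     This function takes a list of properties with their corresponding languages and returns a dictionary
--     where the keys are the properties and the values are the languages that do not have translations.
--
--     Args:
--         properties (list): A list of tuples containing the property, its value, and its language.
--
--     Returns:
--         A dictionary where the keys are the properties and the values are the languages that do not have translations.
--
--     Notes:
--         This function uses a set to store unique properties and a dictionary to store the translations for each property.
--     """
--     # Use a set to store unique properties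
--     unique_properties = set(prop for prop, _, _ in properties)
--
--     # Use a dictionary to store the translations for each property
--     property_translations = {}
--     for prop, _, lang in properties:
--         if prop not in property_translations:
--             property_translations[prop] = set()
--         property_translations[prop].add(lang)
--
--     # Find properties that do not have translations in all languages
--     all_languages = set(lang for _, _, lang in properties)
--     missing_translations = {}
--     for prop, translations in property_translations.items():
--         missing_languages = all_languages - translations
--         if missing_languages:
--             missing_translations[prop] = missing_languages
--
--     return missing_translations
-- ===== SOURCE B (Python) =====
-- def get_missing_translations_for_all_languages(properties):
--     # Transposed strategy: index the data BY LANGUAGE (language -> set of properties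
--     # that have it), then scatter the complement of that relation, pair by pair,
--     # into the result dict; no per-property language sets and no set subtraction.
--     props = list(dict.fromkeys(p for p, _, _ in properties))
--     langs = list(dict.fromkeys(l for _, _, l in properties))
--
--     props_with = {}  # language -> set of properties translated into it
--     for p, _, l in properties:
--         props_with.setdefault(l, set()).add(p)
--
--     missing = {}
--     for p in props:
--         for l in langs:
--             if p not in props_with[l]:
--                 missing.setdefault(p, set()).add(l)
--     return missing
-- ===== Notes on version B (the rewrite author's own statement) =====
-- stated objective: alternative
-- what changed: B transposes the data: instead of A's dict of per-property language sets with a set subtraction per property, B builds the inverse index language->set-of-properties and then scatters the complement of that relation pair by pair (property x language, skipping pairs present in the index) into the result dict via setdefault, so no per-property set and no set difference ever exists.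
import Mathlib
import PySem

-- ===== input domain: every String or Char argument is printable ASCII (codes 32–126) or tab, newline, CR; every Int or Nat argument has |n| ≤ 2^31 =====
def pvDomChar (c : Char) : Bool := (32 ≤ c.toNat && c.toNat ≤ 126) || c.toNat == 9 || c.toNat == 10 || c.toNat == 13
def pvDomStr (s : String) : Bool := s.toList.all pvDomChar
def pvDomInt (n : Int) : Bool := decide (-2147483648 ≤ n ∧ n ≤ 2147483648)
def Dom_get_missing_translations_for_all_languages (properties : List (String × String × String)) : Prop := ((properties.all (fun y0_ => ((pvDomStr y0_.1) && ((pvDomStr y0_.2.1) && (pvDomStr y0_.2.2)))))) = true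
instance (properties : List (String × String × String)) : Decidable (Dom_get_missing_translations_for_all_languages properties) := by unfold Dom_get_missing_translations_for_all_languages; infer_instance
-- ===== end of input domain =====

-- B (alternative, same cost): instead of A's dict of per-property language sets and a set
-- subtraction per property, B builds the TRANSPOSED index language -> set of properties and
-- scatters the complement of that relation pair by pair into the result via setdefault.

-- ===== PORT A =====
-- A groups languages per property in a dict of sets, then subtracts each set from all_languages.
def get_missing_translations_for_all_languages (properties : List (String × String × String)) : List (String × List String) :=
  let _unique_properties : PySem.Set String := PySem.Set.ofList (properties.map (fun p => p.1))
  let property_translations : PySem.Dict String (List String) :=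
    properties.foldl (fun d p => d.insert p.1 (PySem.Set.add (d.getD p.1 PySem.Set.empty) p.2.2)) PySem.Dict.empty
  let all_languages : PySem.Set String := PySem.Set.ofList (properties.map (fun p => p.2.2))
  let missing_translations : PySem.Dict String (List String) :=
    property_translations.items.foldl (fun d kv =>
      let missing_languages := PySem.Set.diff all_languages kv.2
      if !missing_languages.isEmpty then d.insert kv.1 missing_languages else d) PySem.Dict.empty
  missing_translations.items

-- ===== PORT B =====
-- B: inverse index language -> set of properties; then for each (prop, lang) pair of the
-- product not present in the index, add lang to missing[prop] via setdefault.
def get_missing_translations_for_all_languages_alt (properties : List (String × String × String)) : List (String × List String) :=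
  let props : List String := PySem.List.dedup (properties.map (fun p => p.1))
  let langs : List String := PySem.List.dedup (properties.map (fun p => p.2.2))
  let props_with : PySem.Dict String (List String) :=
    properties.foldl (fun d q => d.modify q.2.2 PySem.Set.empty (fun s => PySem.Set.add s q.1)) PySem.Dict.empty
  let missing : PySem.Dict String (List String) :=
    props.foldl (fun d p =>
      langs.foldl (fun d l =>
        if !(PySem.Set.contains (props_with.getD l PySem.Set.empty) p)
        then d.modify p PySem.Set.empty (fun s => PySem.Set.add s l) else d) d) PySem.Dict.empty
  missing.items

-- ===== PRECONDITION & SPEC =====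
def Spec_get_missing_translations_for_all_languages (properties : List (String × String × String)) (out : List (String × List String)) : Prop := out = get_missing_translations_for_all_languages_alt properties
instance (properties : List (String × String × String)) (out : List (String × List String)) : Decidable (Spec_get_missing_translations_for_all_languages properties out) := by unfold Spec_get_missing_translations_for_all_languages; infer_instance

-- ===== CLAIM (what is proved, stated in full; the proofs are below) =====
def Claim_equal_get_missing_translations_for_all_languages : Prop := ∀ (properties : List (String × String × String)), Dom_get_missing_translations_for_all_languages properties → Spec_get_missing_translations_for_all_languages properties (get_missing_translations_for_all_languages properties)

-- ===== LEMMAS AND PROOFS =====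

-- membership in the per-property language set built by A's grouping loop
lemma mem_getD_build (ps : List (String × String × String)) (d : PySem.Dict String (List String)) (p l : String) :
    l ∈ (ps.foldl (fun d q => d.insert q.1 (PySem.Set.add (d.getD q.1 PySem.Set.empty) q.2.2)) d).getD p PySem.Set.empty ↔
      l ∈ d.getD p PySem.Set.empty ∨ ∃ q ∈ ps, q.1 = p ∧ q.2.2 = l := by
  induction ps generalizing d with
  | nil => simp
  | cons q ps ih =>
    rw [List.foldl_cons, ih, PySem.Dict.getD_insert]
    by_cases hp : p = q.1
    · subst hp
      rw [if_pos rfl, PySem.Set.mem_add]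
      constructor
      · rintro ((h | h) | ⟨r, hr, h1, h2⟩)
        · exact Or.inl h
        · exact Or.inr ⟨q, List.mem_cons_self .., rfl, h.symm⟩
        · exact Or.inr ⟨r, List.mem_cons_of_mem _ hr, h1, h2⟩
      · rintro (h | ⟨r, hr, h1, h2⟩)
        · exact Or.inl (Or.inl h)
        · rcases List.mem_cons.1 hr with hr | hr
          · subst hr; exact Or.inl (Or.inr h2.symm)
          · exact Or.inr ⟨r, hr, h1, h2⟩
    · rw [if_neg hp]
      constructor
      · rintro (h | ⟨r, hr, h1, h2⟩)
        · exact Or.inl h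
        · exact Or.inr ⟨r, List.mem_cons_of_mem _ hr, h1, h2⟩
      · rintro (h | ⟨r, hr, h1, h2⟩)
        · exact Or.inl h
        · rcases List.mem_cons.1 hr with hr | hr
          · exact absurd (hr ▸ h1).symm hp
          · exact Or.inr ⟨r, hr, h1, h2⟩

-- membership in the per-language property set built by B's transposed grouping loop
lemma mem_getD_buildT (ps : List (String × String × String)) (d : PySem.Dict String (List String)) (l p : String) :
    p ∈ (ps.foldl (fun d q => d.modify q.2.2 PySem.Set.empty (fun s => PySem.Set.add s q.1)) d).getD l PySem.Set.empty ↔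
      p ∈ d.getD l PySem.Set.empty ∨ ∃ q ∈ ps, q.1 = p ∧ q.2.2 = l := by
  induction ps generalizing d with
  | nil => simp
  | cons q ps ih =>
    rw [List.foldl_cons, ih, PySem.Dict.getD_modify]
    by_cases hl : l = q.2.2
    · subst hl
      rw [if_pos rfl, PySem.Set.mem_add]
      constructor
      · rintro ((h | h) | ⟨r, hr, h1, h2⟩)
        · exact Or.inl h
        · exact Or.inr ⟨q, List.mem_cons_self .., h.symm, rfl⟩
        · exact Or.inr ⟨r, List.mem_cons_of_mem _ hr, h1, h2⟩
      · rintro (h | ⟨r, hr, h1, h2⟩)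
        · exact Or.inl (Or.inl h)
        · rcases List.mem_cons.1 hr with hr | hr
          · subst hr; exact Or.inl (Or.inr h1.symm)
          · exact Or.inr ⟨r, hr, h1, h2⟩
    · rw [if_neg hl]
      constructor
      · rintro (h | ⟨r, hr, h1, h2⟩)
        · exact Or.inl h
        · exact Or.inr ⟨r, List.mem_cons_of_mem _ hr, h1, h2⟩
      · rintro (h | ⟨r, hr, h1, h2⟩)
        · exact Or.inl h
        · rcases List.mem_cons.1 hr with hr | hr
          · exact absurd (hr ▸ h2).symm hl
          · exact Or.inr ⟨r, hr, h1, h2⟩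

-- A's emission loop over an assoc list with fresh distinct keys appends its items
lemma items_foldl_insert_if (L : List (String × List String)) (f : String × List String → List String)
    (d : PySem.Dict String (List String))
    (h1 : ∀ kv ∈ L, d.contains kv.1 = false) (h2 : (L.map (·.1)).Nodup) :
    (L.foldl (fun d kv => if !(f kv).isEmpty then d.insert kv.1 (f kv) else d) d).items =
      d.items ++ (L.filter (fun kv => !(f kv).isEmpty)).map (fun kv => (kv.1, f kv)) := by
  induction L generalizing d with
  | nil => simp
  | cons kv L ih =>
    simp only [List.map_cons, List.nodup_cons] at h2
    rw [List.foldl_cons, List.filter_cons]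
    by_cases hm : (f kv).isEmpty
    · rw [if_neg (by simp [hm]), if_neg (by simp [hm])]
      exact ih d (fun r hr => h1 r (List.mem_cons_of_mem _ hr)) h2.2
    · rw [if_pos (by simp [hm]), if_pos (by simp [hm])]
      have hc : d.contains kv.1 = false := h1 kv (List.mem_cons_self ..)
      rw [ih (d.insert kv.1 (f kv)) ?_ h2.2]
      · rw [PySem.Dict.items_insert_of_not_contains (h := hc), List.map_cons, List.append_assoc]
        rfl
      · intro r hr
        rw [PySem.Dict.contains_insert]
        have hne : r.1 ≠ kv.1 := fun h => h2.1 (h ▸ List.mem_map_of_mem hr)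
        simp [hne, h1 r (List.mem_cons_of_mem _ hr)]

-- B's inner loop once the key p has been created: it keeps appending to p's entry in place
lemma inner_started (p : String) (c : String → Bool) (langs : List String) (hn : langs.Nodup)
    (D0 : List (String × List String)) (s : List String) (d : PySem.Dict String (List String))
    (hitems : d.items = D0 ++ [(p, s)]) (hD0 : p ∉ D0.map (·.1)) (hD0n : (D0.map (·.1)).Nodup)
    (hs : ∀ l ∈ langs, l ∉ s) :
    (langs.foldl (fun d l => if c l then d.modify p PySem.Set.empty (fun t => PySem.Set.add t l) else d) d).items
      = D0 ++ [(p, s ++ langs.filter c)] := by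
  induction langs generalizing s d with
  | nil => simpa using hitems
  | cons l ls ih =>
    rw [List.nodup_cons] at hn
    rw [List.foldl_cons, List.filter_cons]
    have hkeys : d.keys = D0.map (·.1) ++ [p] := by
      simp only [PySem.Dict.keys, hitems, List.map_append, List.map_cons, List.map_nil]
    have hknd : d.keys.Nodup := by
      rw [hkeys]
      refine List.Nodup.append hD0n (List.nodup_singleton p) ?_
      intro a ha hb
      rw [List.mem_singleton] at hb
      exact hD0 (hb ▸ ha)
    have hmem : (p, s) ∈ d.items := by rw [hitems]; exact List.mem_append_right _ (List.mem_cons_self ..)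
    by_cases hc : c l
    · rw [if_pos hc, if_pos hc]
      have hgetD : d.getD p PySem.Set.empty = s := PySem.Dict.getD_of_mem_items _ hmem hknd _
      have hcont : d.contains p = true := by
        rw [PySem.Dict.contains_iff_mem_keys, hkeys]
        exact List.mem_append_right _ (List.mem_cons_self ..)
      have hadd : PySem.Set.add s l = s ++ [l] := by
        have hnm : l ∉ s := hs l (List.mem_cons_self ..)
        have : PySem.Set.contains s l = false := by
          rw [← Bool.not_eq_true, PySem.Set.contains_iff]
          exact hnm
        simp [PySem.Set.add, hnm]
      have hitems' : (d.modify p PySem.Set.empty (fun t => PySem.Set.add t l)).items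
          = D0 ++ [(p, s ++ [l])] := by
        rw [PySem.Dict.modify, hgetD, PySem.Dict.items_insert_of_contains (h := hcont), hitems]
        rw [List.map_append]
        congr 1
        · conv_rhs => rw [← List.map_id D0]
          apply List.map_congr_left
          intro q hq
          have : q.1 ≠ p := fun h => hD0 (h ▸ List.mem_map_of_mem hq)
          simp [this]
        · simp [hadd]
      rw [ih hn.2 (s ++ [l]) _ hitems' ?_]
      · simp
      · intro l' hl'
        rw [List.mem_append, List.mem_singleton]
        rintro (h | rfl)
        · exact hs l' (List.mem_cons_of_mem _ hl') h
        · exact hn.1 hl'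
    · rw [if_neg hc, if_neg (by simpa using hc)]
      exact ih hn.2 s d hitems (fun l' hl' => hs l' (List.mem_cons_of_mem _ hl'))

-- B's inner loop starting from a dict not containing p: it appends (p, missing langs) if nonempty
lemma inner_fresh (p : String) (c : String → Bool) (langs : List String) (hn : langs.Nodup)
    (d : PySem.Dict String (List String)) (hnd : d.keys.Nodup) (hfresh : d.contains p = false) :
    (langs.foldl (fun d l => if c l then d.modify p PySem.Set.empty (fun t => PySem.Set.add t l) else d) d).items
      = d.items ++ (if (langs.filter c).isEmpty then [] else [(p, langs.filter c)]) := by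
  induction langs generalizing d with
  | nil => simp
  | cons l ls ih =>
    rw [List.nodup_cons] at hn
    rw [List.foldl_cons, List.filter_cons]
    by_cases hc : c l
    · rw [if_pos hc, if_pos hc, if_neg (by simp)]
      have hgetD : d.getD p PySem.Set.empty = PySem.Set.empty :=
        PySem.Dict.getD_of_not_contains _ _ hfresh
      have hadd : PySem.Set.add (PySem.Set.empty : PySem.Set String) l = [l] := by
        simp [PySem.Set.add, PySem.Set.empty, PySem.Set.contains]
      have hitems' : (d.modify p PySem.Set.empty (fun t => PySem.Set.add t l)).items
          = d.items ++ [(p, [l])] := by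
        rw [PySem.Dict.modify, hgetD, hadd, PySem.Dict.items_insert_of_not_contains (h := hfresh)]
      have hpk : p ∉ d.items.map (·.1) := by
        intro h
        rw [← Bool.not_eq_true, PySem.Dict.contains_iff_mem_keys] at hfresh
        exact hfresh h
      rw [inner_started p c ls hn.2 d.items [l] _ hitems' hpk hnd ?_]
      · simp
      · intro l' hl'
        rw [List.mem_singleton]
        rintro rfl
        exact hn.1 hl'
    · rw [if_neg hc, if_neg hc]
      exact ih hn.2 d hnd hfresh

-- B's outer scatter loop over distinct fresh properties appends one entry per property with missing langs
lemma outer_scatter (c : String → String → Bool) (langs : List String) (hln : langs.Nodup)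
    (props : List String) (hpn : props.Nodup) (d : PySem.Dict String (List String))
    (hnd : d.keys.Nodup) (hfresh : ∀ p ∈ props, d.contains p = false) :
    (props.foldl (fun d p =>
        langs.foldl (fun d l => if c p l then d.modify p PySem.Set.empty (fun t => PySem.Set.add t l) else d) d) d).items
      = d.items ++ (props.filter (fun p => !(langs.filter (c p)).isEmpty)).map (fun p => (p, langs.filter (c p))) := by
  induction props generalizing d with
  | nil => simp
  | cons p ps ih =>
    rw [List.nodup_cons] at hpn
    rw [List.foldl_cons, List.filter_cons]
    have hfp : d.contains p = false := hfresh p (List.mem_cons_self ..)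
    set d1 := langs.foldl (fun d l => if c p l then d.modify p PySem.Set.empty (fun t => PySem.Set.add t l) else d) d with hd1
    have hitems1 : d1.items = d.items ++ (if (langs.filter (c p)).isEmpty then [] else [(p, langs.filter (c p))]) :=
      inner_fresh p (c p) langs hln d hnd hfp
    have hkeys1 : d1.keys = d.keys ++ (if (langs.filter (c p)).isEmpty then [] else [p]) := by
      simp only [PySem.Dict.keys, hitems1, List.map_append]
      by_cases h : (langs.filter (c p)).isEmpty <;> simp [h]
    have hpnotin : p ∉ d.keys := by
      intro h
      rw [← Bool.not_eq_true, PySem.Dict.contains_iff_mem_keys] at hfp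
      exact hfp h
    have hnd1 : d1.keys.Nodup := by
      rw [hkeys1]
      by_cases h : (langs.filter (c p)).isEmpty
      · simpa [h] using hnd
      · rw [if_neg h]
        refine List.Nodup.append hnd (List.nodup_singleton p) ?_
        intro a ha hb
        rw [List.mem_singleton] at hb
        exact hpnotin (hb ▸ ha)
    have hfresh1 : ∀ q ∈ ps, d1.contains q = false := by
      intro q hq
      have hq1 : q ∉ d.keys := by
        have hh := hfresh q (List.mem_cons_of_mem _ hq)
        rw [← Bool.not_eq_true, PySem.Dict.contains_iff_mem_keys] at hh
        exact hh
      rw [← Bool.not_eq_true, PySem.Dict.contains_iff_mem_keys, hkeys1, List.mem_append]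
      rintro (h | h)
      · exact hq1 h
      · have hqp : q = p := by
          by_cases he : (List.filter (c p) langs).isEmpty
          · rw [if_pos he] at h; cases h
          · rw [if_neg he] at h; simpa using h
        exact hpn.1 (hqp ▸ hq)
    rw [ih hpn.2 d1 hnd1 hfresh1, hitems1]
    by_cases h : (List.filter (c p) langs).isEmpty = true
    · rw [if_pos h, if_neg (by simp [h])]
      simp
    · rw [if_neg h, if_pos (by simp [h])]
      simp [List.append_assoc]

-- B's emptiness test over languages equals set-membership in the pair relation (for every p, l)
lemma condT (properties : List (String × String × String)) (p l : String) :
    (PySem.Set.contains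
        ((properties.foldl (fun d q => d.modify q.2.2 PySem.Set.empty (fun s => PySem.Set.add s q.1)) PySem.Dict.empty).getD l PySem.Set.empty) p)
      = PySem.Set.contains (PySem.Set.ofList (properties.map (fun q => (q.1, q.2.2)))) (p, l) := by
  rw [Bool.eq_iff_iff, PySem.Set.contains_iff, PySem.Set.contains_iff, mem_getD_buildT,
      PySem.Set.mem_ofList, List.mem_map, PySem.Dict.getD_empty]
  constructor
  · rintro (h | ⟨q, hq, h1, h2⟩)
    · simp [PySem.Set.empty] at h
    · exact ⟨q, hq, by rw [h1, h2]⟩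
  · rintro ⟨q, hq, h⟩
    exact Or.inr ⟨q, hq, congrArg Prod.fst h, congrArg Prod.snd h⟩

-- the two per-property "missing languages" lists coincide (for every property name)
lemma missing_pointwise (properties : List (String × String × String)) (p : String) :
    PySem.Set.diff (PySem.Set.ofList (properties.map (fun q => q.2.2)))
        ((properties.foldl (fun d q => d.insert q.1 (PySem.Set.add (d.getD q.1 PySem.Set.empty) q.2.2)) PySem.Dict.empty).getD p PySem.Set.empty) =
      (PySem.Set.ofList (properties.map (fun q => q.2.2))).filter
        (fun lang => !(PySem.Set.contains (PySem.Set.ofList (properties.map (fun q => (q.1, q.2.2)))) (p, lang))) := by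
  show List.filter _ _ = List.filter _ _
  apply List.filter_congr
  intro l _
  have hmem : l ∈ (properties.foldl (fun d q => d.insert q.1 (PySem.Set.add (d.getD q.1 PySem.Set.empty) q.2.2)) PySem.Dict.empty).getD p PySem.Set.empty ↔
      (p, l) ∈ PySem.Set.ofList (properties.map (fun q => (q.1, q.2.2))) := by
    rw [mem_getD_build, PySem.Set.mem_ofList, List.mem_map, PySem.Dict.getD_empty]
    constructor
    · rintro (h | ⟨q, hq, h1, h2⟩)
      · simp [PySem.Set.empty] at h
      · exact ⟨q, hq, by rw [h1, h2]⟩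
    · rintro ⟨q, hq, h⟩
      exact Or.inr ⟨q, hq, congrArg Prod.fst h, congrArg Prod.snd h⟩
  have hcont : PySem.Set.contains ((properties.foldl (fun d q => d.insert q.1 (PySem.Set.add (d.getD q.1 PySem.Set.empty) q.2.2)) PySem.Dict.empty).getD p PySem.Set.empty) l =
      PySem.Set.contains (PySem.Set.ofList (properties.map (fun q => (q.1, q.2.2)))) (p, l) := by
    rw [Bool.eq_iff_iff, PySem.Set.contains_iff, PySem.Set.contains_iff]
    exact hmem
  rw [hcont]

-- ===== VERDICT (by name: the statement is the Claim_ definition above) =====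
theorem get_missing_translations_for_all_languages_spec : Claim_equal_get_missing_translations_for_all_languages := by
  intro properties _
  unfold Spec_get_missing_translations_for_all_languages
  show get_missing_translations_for_all_languages properties = _
  unfold get_missing_translations_for_all_languages get_missing_translations_for_all_languages_alt
  simp only []
  -- canonical form of B, via the scatter lemmas
  rw [outer_scatter
        (fun p l => !(PySem.Set.contains
          ((properties.foldl (fun d q => d.modify q.2.2 PySem.Set.empty (fun s => PySem.Set.add s q.1)) PySem.Dict.empty).getD l PySem.Set.empty) p))
        (PySem.List.dedup (properties.map (fun p => p.2.2))) (PySem.List.nodup_dedup _)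
        (PySem.List.dedup (properties.map (fun p => p.1))) (PySem.List.nodup_dedup _)
        PySem.Dict.empty PySem.Dict.nodup_keys_empty (by simp [PySem.Dict.contains_empty])]
  -- canonical form of A (as in the A-side lemmas)
  set pt := properties.foldl (fun d q => d.insert q.1 (PySem.Set.add (d.getD q.1 PySem.Set.empty) q.2.2)) PySem.Dict.empty with hpt
  have hnd : pt.keys.Nodup :=
    PySem.Dict.nodup_keys_foldl_insert_key properties (fun q => q.1)
      (fun d q => PySem.Set.add (d.getD q.1 PySem.Set.empty) q.2.2) PySem.Dict.empty PySem.Dict.nodup_keys_empty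
  have hkeys : pt.keys = PySem.List.dedup (properties.map (fun p => p.1)) := by
    rw [hpt, PySem.Dict.keys_foldl_insert_key properties (fun q => q.1)
      (fun d q => PySem.Set.add (d.getD q.1 PySem.Set.empty) q.2.2) PySem.Dict.empty]
    simp [PySem.Dict.keys_empty, PySem.Set.update_nil_left]
  have hitems : pt.items = pt.keys.map (fun k => (k, pt.getD k PySem.Set.empty)) :=
    PySem.Dict.items_eq_map_keys pt hnd PySem.Set.empty
  rw [items_foldl_insert_if pt.items (fun kv => PySem.Set.diff (PySem.Set.ofList (properties.map (fun p => p.2.2))) kv.2)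
        PySem.Dict.empty (by simp [PySem.Dict.contains_empty]) hnd]
  rw [hitems, List.filter_map, List.map_map, hkeys]
  have hemp : (PySem.Dict.empty : PySem.Dict String (List String)).items = [] := rfl
  simp only [hemp, List.nil_append, Function.comp_def]
  -- both sides are now filter-then-map over the same distinct property list; match pointwise
  have hlangs : PySem.List.dedup (properties.map (fun p => p.2.2)) = PySem.Set.ofList (properties.map (fun p => p.2.2)) := by
    simp
  have hB : ∀ p : String,
      (PySem.List.dedup (properties.map (fun p => p.2.2))).filter
        (fun l => !(PySem.Set.contains
          ((properties.foldl (fun d q => d.modify q.2.2 PySem.Set.empty (fun s => PySem.Set.add s q.1)) PySem.Dict.empty).getD l PySem.Set.empty) p))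
      = PySem.Set.diff (PySem.Set.ofList (properties.map (fun q => q.2.2))) (pt.getD p PySem.Set.empty) := by
    intro p
    rw [hpt, missing_pointwise, hlangs]
    apply List.filter_congr
    intro l _
    rw [condT]
  have hc : (PySem.List.dedup (properties.map (fun p => p.1))).filter
      (fun k => !(PySem.Set.diff (PySem.Set.ofList (properties.map (fun p => p.2.2))) (pt.getD k PySem.Set.empty)).isEmpty) =
    (PySem.List.dedup (properties.map (fun p => p.1))).filter
      (fun p => !((PySem.List.dedup (properties.map (fun p => p.2.2))).filter
        (fun l => !(PySem.Set.contains
          ((properties.foldl (fun d q => d.modify q.2.2 PySem.Set.empty (fun s => PySem.Set.add s q.1)) PySem.Dict.empty).getD l PySem.Set.empty) p))).isEmpty) := by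
    apply List.filter_congr
    intro p _
    rw [hB p]
  rw [hc]
  apply List.map_congr_left
  intro p _
  rw [hB p]
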